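-- pv_equiv track=rewrite | github.com/namzkk2002/Python_HIT | Buoi3/bai1.py | ss10
-- ===== SOURCE A (Python) =====
-- def ss10(x , y):
--     set1 = {""}
--     set2 = {""}
--     for i in range(len(x)):
--         if x[i]=='0'or x[i]=='1':
--             set1.add(i)
--     for i in range(len(y)):
--         if y[i]=='0'or y[i]=='1':
--             set2.add(i)
--     if len(set1-set2)==0 and len(set2-set1)==0:
--         return True
--     else:
--         return False
-- ===== SOURCE B (Python) =====
-- def ss10(x, y):
--     def bin_at(s, i):
--         return i < len(s) and s[i] in ('0', '1')
--     return all(bin_at(x, i) == bin_at(y, i) for i in range(max(len(x), len(y))))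
-- ===== Notes on version B (the rewrite author's own statement) =====
-- stated objective: simpler
-- what changed: Replaces the two index-set build loops plus two set-difference tests with a single pass over range(max(len(x),len(y))) comparing, at each position, whether both strings have a binary digit there; no auxiliary sets are built.
import Mathlib
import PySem

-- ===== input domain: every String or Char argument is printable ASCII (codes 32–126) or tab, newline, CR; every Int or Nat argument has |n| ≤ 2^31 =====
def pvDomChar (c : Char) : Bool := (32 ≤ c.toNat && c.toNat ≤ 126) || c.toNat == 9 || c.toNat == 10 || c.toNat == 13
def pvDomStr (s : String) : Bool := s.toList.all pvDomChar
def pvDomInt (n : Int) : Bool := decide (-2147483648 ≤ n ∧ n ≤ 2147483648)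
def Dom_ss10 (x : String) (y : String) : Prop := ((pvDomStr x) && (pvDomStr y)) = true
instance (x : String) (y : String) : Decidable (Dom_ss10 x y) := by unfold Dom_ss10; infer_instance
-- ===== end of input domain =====

-- B replaces the two index-set builds and set-difference tests with one pass
-- comparing binary-digit presence position by position (objective: simpler).

-- ===== PORT A =====
-- Python's sets hold the sentinel "" plus Int indices; modelled as Option Int: none = "", some i = index i.
def ss10 (x : String) (y : String) : Bool :=
  let set1 : PySem.Set (Option Int) := PySem.Set.ofList [none]
  let set1 := (PySem.List.pyRange 0 (PySem.Str.len x) 1).foldl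
    (fun s i =>
      if PySem.List.pyGetD x.toList i ' ' == '0' || PySem.List.pyGetD x.toList i ' ' == '1'
      then PySem.Set.add s (some i) else s) set1
  let set2 : PySem.Set (Option Int) := PySem.Set.ofList [none]
  let set2 := (PySem.List.pyRange 0 (PySem.Str.len y) 1).foldl
    (fun s i =>
      if PySem.List.pyGetD y.toList i ' ' == '0' || PySem.List.pyGetD y.toList i ' ' == '1'
      then PySem.Set.add s (some i) else s) set2
  if PySem.Set.len (PySem.Set.diff set1 set2) == 0 ∧ PySem.Set.len (PySem.Set.diff set2 set1) == 0
  then true else false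

-- ===== PORT B =====
-- bin_at s i = (i < len(s) and s[i] in ('0','1'))
def binAt (l : List Char) (i : Nat) : Bool :=
  match l[i]? with
  | some c => c == '0' || c == '1'
  | none => false

def ss10_alt (x : String) (y : String) : Bool :=
  (List.range (max x.toList.length y.toList.length)).all
    (fun i => binAt x.toList i == binAt y.toList i)

-- ===== PRECONDITION & SPEC =====
def Spec_ss10 (x : String) (y : String) (out : Bool) : Prop := out = ss10_alt x y
instance (x : String) (y : String) (out : Bool) : Decidable (Spec_ss10 x y out) := by unfold Spec_ss10; infer_instance

-- ===== CLAIM (what is proved, stated in full; the proofs are below) =====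
def Claim_equal_ss10 : Prop := ∀ (x : String) (y : String), Dom_ss10 x y → Spec_ss10 x y (ss10 x y)

-- ===== LEMMAS AND PROOFS =====

-- membership after a conditional-add fold (specific shape of A's loops)
theorem mem_foldl_add_if {α β : Type} [BEq α] [LawfulBEq α]
    (l : List β) (p : β → Bool) (f : β → α) (s : PySem.Set α) (e : α) :
    e ∈ l.foldl (fun s b => if p b then PySem.Set.add s (f b) else s) s ↔
      e ∈ s ∨ ∃ b ∈ l, p b ∧ e = f b := by
  induction l generalizing s with
  | nil => simp
  | cons b t ih =>
    simp only [List.foldl_cons]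
    by_cases hp : p b = true
    · rw [if_pos hp, ih]
      simp only [PySem.Set.mem_add, List.mem_cons]
      constructor
      · rintro ((h | rfl) | ⟨c, hc, hpc, rfl⟩)
        · exact Or.inl h
        · exact Or.inr ⟨b, Or.inl rfl, hp, rfl⟩
        · exact Or.inr ⟨c, Or.inr hc, hpc, rfl⟩
      · rintro (h | ⟨c, (rfl | hc), hpc, rfl⟩)
        · exact Or.inl (Or.inl h)
        · exact Or.inl (Or.inr rfl)
        · exact Or.inr ⟨c, hc, hpc, rfl⟩
    · rw [if_neg hp, ih]
      constructor
      · rintro (h | ⟨c, hc, hpc, rfl⟩)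
        · exact Or.inl h
        · exact Or.inr ⟨c, List.mem_cons_of_mem _ hc, hpc, rfl⟩
      · rintro (h | ⟨c, hc, hpc, rfl⟩)
        · exact Or.inl h
        · rcases List.mem_cons.1 hc with rfl | hc'
          · exact absurd hpc hp
          · exact Or.inr ⟨c, hc', hpc, rfl⟩

-- membership in A's set for string s: none, plus some i for binary positions
theorem mem_setA (l : List Char) (e : Option Int) :
    e ∈ (PySem.List.pyRange 0 (l.length : Int) 1).foldl
      (fun s i =>
        if PySem.List.pyGetD l i ' ' == '0' || PySem.List.pyGetD l i ' ' == '1'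
        then PySem.Set.add s (some i) else s) (PySem.Set.ofList [none]) ↔
      e = none ∨ ∃ k : Nat, k < l.length ∧ binAt l k ∧ e = some (k : Int) := by
  rw [mem_foldl_add_if]
  constructor
  · rintro (h | ⟨i, hi, hp, rfl⟩)
    · left; simpa [PySem.Set.ofList] using h
    · right
      rw [PySem.List.mem_pyRange_one] at hi
      obtain ⟨h0, hlt⟩ := hi
      refine ⟨i.toNat, by omega, ?_, by simp [Int.toNat_of_nonneg h0]⟩
      have hidx : i = (i.toNat : Int) := (Int.toNat_of_nonneg h0).symm
      rw [hidx, PySem.List.pyGetD_natCast] at hp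
      have hk : i.toNat < l.length := by omega
      unfold binAt
      rw [List.getElem?_eq_getElem hk]
      simpa [List.getD, List.getElem?_eq_getElem hk] using hp
  · rintro (rfl | ⟨k, hk, hb, rfl⟩)
    · left; simp [PySem.Set.ofList]
    · right
      refine ⟨(k : Int), ?_, ?_, rfl⟩
      · rw [PySem.List.mem_pyRange_one]; omega
      · unfold binAt at hb
        rw [List.getElem?_eq_getElem hk] at hb
        rw [PySem.List.pyGetD_natCast]
        simpa [List.getD, List.getElem?_eq_getElem hk] using hb

-- binAt is false past the end
theorem binAt_ge (l : List Char) (k : Nat) (h : l.length ≤ k) : binAt l k = false := by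
  unfold binAt
  rw [List.getElem?_eq_none h]

theorem binAt_lt (l : List Char) (k : Nat) (h : binAt l k = true) : k < l.length := by
  by_contra hk
  rw [binAt_ge l k (by omega)] at h
  exact absurd h (by simp)

-- for a single index: some k is in A's set iff position k holds a binary digit
theorem mem_setA_some (l : List Char) (k : Nat) :
    ((some (k : Int)) ∈ (PySem.List.pyRange 0 (l.length : Int) 1).foldl
      (fun s i =>
        if PySem.List.pyGetD l i ' ' == '0' || PySem.List.pyGetD l i ' ' == '1'
        then PySem.Set.add s (some i) else s) (PySem.Set.ofList [none])) ↔ binAt l k = true := by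
  rw [mem_setA]
  constructor
  · rintro (h | ⟨j, hj, hb, hsj⟩)
    · exact absurd h (by simp)
    · have h1 : (k : Int) = (j : Int) := Option.some.inj hsj
      have h2 : j = k := by exact_mod_cast h1.symm
      subst h2
      exact hb
  · intro hb
    exact Or.inr ⟨k, binAt_lt l k hb, hb, rfl⟩

theorem len_diff_eq_zero_iff (s t : PySem.Set (Option Int)) :
    (PySem.Set.len (PySem.Set.diff s t) == 0) = true ↔ ∀ e ∈ s, e ∈ t := by
  constructor
  · intro h e he
    have hlen : (PySem.Set.diff s t).length = 0 := by
      simpa [PySem.Set.len] using h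
    rw [List.length_eq_zero_iff] at hlen
    by_contra hnt
    have hmem : e ∈ PySem.Set.diff s t := (PySem.Set.mem_diff _ _ _).2 ⟨he, hnt⟩
    rw [hlen] at hmem
    exact absurd hmem (by simp)
  · intro h
    have hnil : PySem.Set.diff s t = [] := by
      rw [List.eq_nil_iff_forall_not_mem]
      intro e he
      rw [PySem.Set.mem_diff] at he
      exact he.2 (h e he.1)
    simp [PySem.Set.len, hnil]

theorem ss10_spec_aux (x y : String) : ss10 x y = ss10_alt x y := by
  unfold ss10 ss10_alt
  simp only [PySem.Str.len_eq]
  cases hB : (List.range (max x.toList.length y.toList.length)).all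
      (fun i => binAt x.toList i == binAt y.toList i) with
  | true =>
    have heq : ∀ k : Nat, binAt x.toList k = binAt y.toList k := by
      intro k
      by_cases hk : k < max x.toList.length y.toList.length
      · have := (List.all_eq_true.1 hB) k (List.mem_range.2 hk)
        exact eq_of_beq this
      · rw [binAt_ge x.toList k (by omega), binAt_ge y.toList k (by omega)]
    rw [if_pos]
    constructor
    · rw [len_diff_eq_zero_iff]
      intro e he
      rw [mem_setA] at he ⊢
      rcases he with rfl | ⟨k, _, hb, rfl⟩
      · exact Or.inl rfl
      · have hby : binAt y.toList k = true := (heq k) ▸ hb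
        exact Or.inr ⟨k, binAt_lt _ k hby, hby, rfl⟩
    · rw [len_diff_eq_zero_iff]
      intro e he
      rw [mem_setA] at he ⊢
      rcases he with rfl | ⟨k, _, hb, rfl⟩
      · exact Or.inl rfl
      · have hbx : binAt x.toList k = true := (heq k).symm ▸ hb
        exact Or.inr ⟨k, binAt_lt _ k hbx, hbx, rfl⟩
  | false =>
    obtain ⟨k, hkmem, hkne⟩ := List.all_eq_false.1 hB
    have hne : binAt x.toList k ≠ binAt y.toList k := by
      intro h; rw [h] at hkne; simp at hkne
    rw [if_neg]
    rintro ⟨h12, h21⟩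
    have hiff : binAt x.toList k = true ↔ binAt y.toList k = true := by
      rw [← mem_setA_some x.toList k, ← mem_setA_some y.toList k]
      exact ⟨fun h => (len_diff_eq_zero_iff _ _).1 h12 _ h,
             fun h => (len_diff_eq_zero_iff _ _).1 h21 _ h⟩
    cases hbx : binAt x.toList k <;> cases hby : binAt y.toList k
    · exact hne (hbx.trans hby.symm)
    · rw [hbx, hby] at hiff; simp at hiff
    · rw [hbx, hby] at hiff; simp at hiff
    · exact hne (hbx.trans hby.symm)

-- ===== VERDICT (by name: the statement is the Claim_ definition above) =====
theorem ss10_spec : Claim_equal_ss10 := by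
  intro x y _
  unfold Spec_ss10
  exact ss10_spec_aux x y
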